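-- pv_equiv track=rewrite | github.com/Sirvess/advent-of-code | 2020/day14.py | maskFilter
-- ===== SOURCE A (Python) =====
-- def maskFilter(inp, mask, mode):
--     filteredInp = mask.copy()
--     for i in range(0, len(filteredInp)):
--         if mode == "A":
--             if i in range(0, len(inp)):
--                 if filteredInp[len(filteredInp) - 1 - i] == "X":
--                     filteredInp[len(filteredInp) - 1 - i] = inp[len(inp) - 1 - i]
--             else:
--                 if filteredInp[len(filteredInp) - 1 - i] == "X":
--                     filteredInp[len(filteredInp) - 1 - i] = "0"
--         elif mode == "B":
--             if i in range(0, len(inp)):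
--                 if filteredInp[len(filteredInp) - 1 - i] == "0":
--                     filteredInp[len(filteredInp) - 1 - i] = inp[len(inp) - 1 - i]
--     return filteredInp
-- ===== SOURCE B (Python) =====
-- def maskFilter(inp, mask, mode):
--     m = len(mask)
--     # right-align inp at width m: truncate high bits or pad with '0's
--     pad = inp[len(inp) - m:] if len(inp) >= m else ["0"] * (m - len(inp)) + list(inp)
--     if mode == "A":
--         return [pad[j] if c == "X" else c for j, c in enumerate(mask)]
--     if mode == "B":
--         return [pad[j] if c == "0" else c for j, c in enumerate(mask)]
--     return mask.copy()
-- ===== Notes on version B (the rewrite author's own statement) =====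
-- stated objective: simpler
-- what changed: A mutates a copy of mask in a reversed-index loop with per-iteration range membership tests; B right-aligns inp to the mask width once (slice or '0'-padding) and produces the result in a single forward comprehension, with no index arithmetic or in-place updates.
import Mathlib
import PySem

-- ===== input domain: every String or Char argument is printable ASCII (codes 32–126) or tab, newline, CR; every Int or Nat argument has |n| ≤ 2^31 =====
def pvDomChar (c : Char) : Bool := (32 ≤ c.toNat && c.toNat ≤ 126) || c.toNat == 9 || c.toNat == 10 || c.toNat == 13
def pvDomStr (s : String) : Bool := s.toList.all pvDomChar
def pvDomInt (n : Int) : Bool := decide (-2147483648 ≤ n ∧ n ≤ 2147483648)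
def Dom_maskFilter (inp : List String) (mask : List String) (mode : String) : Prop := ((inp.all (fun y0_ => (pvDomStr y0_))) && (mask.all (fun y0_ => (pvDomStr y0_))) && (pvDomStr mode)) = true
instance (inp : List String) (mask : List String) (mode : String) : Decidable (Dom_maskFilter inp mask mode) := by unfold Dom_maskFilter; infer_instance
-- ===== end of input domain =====

-- B replaces A's index-juggling in-place loop by right-padding inp once and one forward
-- comprehension over mask (objective: simpler); return-value equivalence, neither mutates.

-- ===== PORT A =====
-- literal port of A: copy mask, loop i over range(len(mask)), conditional in-place set
-- at position len-1-i (all indices are provably in range, so Nat getD/set is exact here)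
def maskFilter (inp : List String) (mask : List String) (mode : String) : List String :=
  (List.range mask.length).foldl (fun f i =>
    if mode == "A" then
      if i < inp.length then
        if f.getD (f.length - 1 - i) "" == "X" then
          f.set (f.length - 1 - i) (inp.getD (inp.length - 1 - i) "")
        else f
      else
        if f.getD (f.length - 1 - i) "" == "X" then
          f.set (f.length - 1 - i) "0"
        else f
    else if mode == "B" then
      if i < inp.length then
        if f.getD (f.length - 1 - i) "" == "0" then
          f.set (f.length - 1 - i) (inp.getD (inp.length - 1 - i) "")
        else f
      else f
    else f) mask

-- ===== PORT B =====
-- port of Source B: pad = right-aligned inp at width len(mask), then one comprehension over mask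
def maskFilter_alt (inp : List String) (mask : List String) (mode : String) : List String :=
  let m := mask.length
  let pad := if inp.length ≥ m then inp.drop (inp.length - m)
             else List.replicate (m - inp.length) "0" ++ inp
  if mode == "A" then
    mask.zipIdx.map (fun cj => if cj.1 == "X" then pad.getD cj.2 "" else cj.1)
  else if mode == "B" then
    mask.zipIdx.map (fun cj => if cj.1 == "0" then pad.getD cj.2 "" else cj.1)
  else mask

-- ===== PRECONDITION & SPEC =====
def Spec_maskFilter (inp : List String) (mask : List String) (mode : String) (out : List String) : Prop := out = maskFilter_alt inp mask mode
instance (inp : List String) (mask : List String) (mode : String) (out : List String) : Decidable (Spec_maskFilter inp mask mode out) := by unfold Spec_maskFilter; infer_instance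

-- ===== CLAIM (what is proved, stated in full; the proofs are below) =====
def Claim_equal_maskFilter : Prop := ∀ (inp : List String) (mask : List String) (mode : String), Dom_maskFilter inp mask mode → Spec_maskFilter inp mask mode (maskFilter inp mask mode)

-- ===== LEMMAS AND PROOFS =====

-- per-position value A writes at position m-1-i during step i (as a function of mask's value there)
def stepVal (inp : List String) (mode : String) (i : Nat) (x : String) : String :=
  if mode == "A" then
    if i < inp.length then (if x == "X" then inp.getD (inp.length - 1 - i) "" else x)
    else (if x == "X" then "0" else x)
  else if mode == "B" then
    if i < inp.length then (if x == "0" then inp.getD (inp.length - 1 - i) "" else x)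
    else x
  else x

-- state of A's list after processing i = 0 .. n-1
def stateA (inp : List String) (mask : List String) (mode : String) (n : Nat) : List String :=
  (List.range mask.length).map (fun j =>
    if mask.length - n ≤ j then stepVal inp mode (mask.length - 1 - j) (mask.getD j "")
    else mask.getD j "")

lemma stepA_eq (inp : List String) (mode : String) (f : List String) (i : Nat)
    (hf : f ≠ []) :
    (if mode == "A" then
      if i < inp.length then
        if f.getD (f.length - 1 - i) "" == "X" then
          f.set (f.length - 1 - i) (inp.getD (inp.length - 1 - i) "")
        else f
      else
        if f.getD (f.length - 1 - i) "" == "X" then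
          f.set (f.length - 1 - i) "0"
        else f
    else if mode == "B" then
      if i < inp.length then
        if f.getD (f.length - 1 - i) "" == "0" then
          f.set (f.length - 1 - i) (inp.getD (inp.length - 1 - i) "")
        else f
      else f
    else f)
    = f.set (f.length - 1 - i) (stepVal inp mode i (f.getD (f.length - 1 - i) "")) := by
  have hlen : f.length - 1 - i < f.length := by
    have : 0 < f.length := List.length_pos_iff.mpr hf
    omega
  unfold stepVal
  split_ifs with h1 h2 h3 h4 h5 h6 h7 <;>
    simp_all

lemma stateA_zero (inp : List String) (mask : List String) (mode : String) :
    stateA inp mask mode 0 = mask := by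
  unfold stateA
  apply List.ext_getElem (by simp)
  intro j hj hj'
  simp only [List.getElem_map, List.getElem_range]
  rw [if_neg (by omega), List.getD_eq_getElem mask _ hj']

lemma length_stateA (inp : List String) (mask : List String) (mode : String) (n : Nat) :
    (stateA inp mask mode n).length = mask.length := by simp [stateA]

lemma stateA_succ (inp : List String) (mask : List String) (mode : String) (n : Nat)
    (hn : n < mask.length) :
    stateA inp mask mode (n + 1)
      = (stateA inp mask mode n).set (mask.length - 1 - n)
          (stepVal inp mode n ((stateA inp mask mode n).getD (mask.length - 1 - n) "")) := by
  have hgd : (stateA inp mask mode n).getD (mask.length - 1 - n) ""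
      = mask.getD (mask.length - 1 - n) "" := by
    rw [List.getD_eq_getElem _ _ (by rw [length_stateA]; omega)]
    unfold stateA
    simp only [List.getElem_map, List.getElem_range]
    rw [if_neg (by omega), List.getD_eq_getElem mask _ (by omega)]
  rw [hgd]
  apply List.ext_getElem (by simp [stateA])
  intro j hj hj'
  have hjm : j < mask.length := by simpa [stateA] using hj
  rw [List.getElem_set]
  unfold stateA
  simp only [List.getElem_map, List.getElem_range]
  by_cases he : mask.length - 1 - n = j
  · rw [if_pos he, if_pos (by omega), ← he]
    have h2 : mask.length - 1 - (mask.length - 1 - n) = n := by omega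
    rw [h2, List.getD_eq_getElem mask _ (by omega)]
  · rw [if_neg he]
    by_cases h1 : mask.length - (n + 1) ≤ j
    · rw [if_pos h1, if_pos (by omega)]
    · rw [if_neg h1, if_neg (by omega)]

lemma foldl_eq_stateA (inp : List String) (mask : List String) (mode : String) (n : Nat)
    (hn : n ≤ mask.length) :
    (List.range n).foldl (fun f i =>
      if mode == "A" then
        if i < inp.length then
          if f.getD (f.length - 1 - i) "" == "X" then
            f.set (f.length - 1 - i) (inp.getD (inp.length - 1 - i) "")
          else f
        else
          if f.getD (f.length - 1 - i) "" == "X" then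
            f.set (f.length - 1 - i) "0"
          else f
      else if mode == "B" then
        if i < inp.length then
          if f.getD (f.length - 1 - i) "" == "0" then
            f.set (f.length - 1 - i) (inp.getD (inp.length - 1 - i) "")
          else f
        else f
      else f) mask = stateA inp mask mode n := by
  induction n with
  | zero => simp [stateA_zero]
  | succ k ih =>
    rw [List.range_succ, List.foldl_append, ih (by omega)]
    simp only [List.foldl_cons, List.foldl_nil]
    have hne : stateA inp mask mode k ≠ [] := by
      have := length_stateA inp mask mode k
      intro h; rw [h] at this; simp at this; omega
    rw [stepA_eq inp mode _ k hne, length_stateA, stateA_succ inp mask mode k (by omega)]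

lemma pad_getD (inp : List String) (mask : List String) (j : Nat) (hj : j < mask.length) :
    (if inp.length ≥ mask.length then inp.drop (inp.length - mask.length)
     else List.replicate (mask.length - inp.length) "0" ++ inp).getD j ""
    = (if mask.length - 1 - j < inp.length
       then inp.getD (inp.length - 1 - (mask.length - 1 - j)) "" else "0") := by
  split_ifs with h1 h2 h3
  · rw [List.getD_eq_getElem _ _ (by simp; omega), List.getElem_drop,
        List.getD_eq_getElem _ _ (by omega)]
    congr 1; omega
  · omega
  · rw [List.getD_eq_getElem _ _ (by simp; omega)]
    rw [List.getElem_append_right (by simp; omega)]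
    rw [List.getD_eq_getElem _ _ (by omega)]
    congr 1; simp only [List.length_replicate]; omega
  · rw [List.getD_eq_getElem _ _ (by simp; omega)]
    rw [List.getElem_append_left (by simp; omega)]
    simp

-- ===== VERDICT (by name: the statement is the Claim_ definition above) =====
theorem maskFilter_spec : Claim_equal_maskFilter := by
  intro inp mask mode _
  unfold Spec_maskFilter maskFilter maskFilter_alt
  rw [foldl_eq_stateA inp mask mode mask.length le_rfl]
  unfold stateA
  by_cases hA : mode == "A"
  · rw [if_pos hA]
    apply List.ext_getElem (by simp)
    intro j hj hj'
    simp only [List.getElem_map, List.getElem_range, List.getElem_zipIdx]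
    have hjm : j < mask.length := by simpa using hj
    rw [if_pos (by omega)]
    unfold stepVal
    rw [if_pos hA]
    rw [Nat.zero_add, pad_getD inp mask j hjm]
    rw [List.getD_eq_getElem mask _ hjm]
    split_ifs <;> simp_all
  · rw [if_neg hA]
    by_cases hB : mode == "B"
    · rw [if_pos hB]
      apply List.ext_getElem (by simp)
      intro j hj hj'
      simp only [List.getElem_map, List.getElem_range, List.getElem_zipIdx]
      have hjm : j < mask.length := by simpa using hj
      rw [if_pos (by omega)]
      unfold stepVal
      rw [if_neg (by simp_all), if_pos hB]
      rw [Nat.zero_add, pad_getD inp mask j hjm]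
      rw [List.getD_eq_getElem mask _ hjm]
      split_ifs <;> simp_all
    · rw [if_neg hB]
      apply List.ext_getElem (by simp)
      intro j hj hj'
      simp only [List.getElem_map, List.getElem_range]
      have hjm : j < mask.length := by simpa using hj
      rw [if_pos (by omega)]
      unfold stepVal
      rw [if_neg hA, if_neg hB]
      rw [List.getD_eq_getElem mask _ hjm]
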